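-- pv_equiv track=rewrite | github.com/jm-welch/PyChord | pychord.py | chord_parse
-- ===== SOURCE A (Python) =====
-- def chord_parse(paragraph):
--   """ Parse chords from a paragraph of text
--   lines - paragraph, as a list of lines
--   """
--
--   for line in paragraph:
--     ch_line, ly_line = '', ''
--     while '[' in line:
--       x = line.find('[')
--       y = line.find(']')
--       ch_line += '{0: >{1}}'.format(line[x+1:y], x if ch_line else x+1)
--       ly_line += line[0:x]
--       line = line[y+1:]
--
--     ly_line += line
--     yield ch_line
--     yield ly_line
-- ===== SOURCE B (Python) =====
-- def chord_parse(paragraph):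
--     """Parse chords from a paragraph of text (single offset-based scan per
--     line; builds each output with a parts list + join instead of repeated
--     slicing/concatenation)."""
--     for line in paragraph:
--         ch_parts, ly_parts = [], []
--         pos = 0
--         first = True
--         while True:
--             x = line.find('[', pos)
--             if x == -1:
--                 break
--             y = line.find(']', pos)
--             if y == -1:
--                 break
--             chord = line[x + 1:y]
--             width = x - pos + (1 if first else 0)
--             first = False
--             pad = width - len(chord)
--             if pad > 0:
--                 ch_parts.append(' ' * pad)
--             ch_parts.append(chord)
--             ly_parts.append(line[pos:x])
--             pos = y + 1
--         ly_parts.append(line[pos:])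
--         yield ''.join(ch_parts)
--         yield ''.join(ly_parts)
-- ===== Notes on version B (the rewrite author's own statement) =====
-- stated objective: alternative
-- what changed: B replaces A's repeated re-slicing of the line (line = line[y+1:] each iteration) and string += concatenation with a single left-to-right scan tracking an offset into the unchanged line, collecting pieces in parts lists joined once per output string; Pre_ excludes lines with a '[' after the last ']', on which A's while-loop never terminates.
import Mathlib
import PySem

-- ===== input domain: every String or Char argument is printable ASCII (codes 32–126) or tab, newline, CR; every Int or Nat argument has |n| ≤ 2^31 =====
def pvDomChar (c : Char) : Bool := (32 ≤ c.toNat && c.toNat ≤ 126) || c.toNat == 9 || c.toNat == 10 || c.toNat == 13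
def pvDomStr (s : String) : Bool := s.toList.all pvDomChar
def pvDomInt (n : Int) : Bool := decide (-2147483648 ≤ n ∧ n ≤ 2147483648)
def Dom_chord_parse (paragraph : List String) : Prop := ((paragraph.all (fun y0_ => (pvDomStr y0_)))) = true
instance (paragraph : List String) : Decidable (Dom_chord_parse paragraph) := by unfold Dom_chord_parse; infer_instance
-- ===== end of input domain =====

-- B replaces A's repeated re-slicing of the line and string += concatenation by a single
-- offset-based scan per line that collects parts lists joined once per output (alternative).

-- ===== PORT A =====

def pyRJust (chord : List Char) (w : Int) : List Char :=
  List.replicate (w - chord.length).toNat ' ' ++ chord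

def chordLineA (fuel : Nat) (line ch ly : List Char) : List Char × List Char :=
  match fuel with
  | 0 => (ch, ly ++ line)
  | fuel + 1 =>
    if PySem.Chars.isIn ['['] line then
      let x := PySem.Chars.find line ['[']
      let y := PySem.Chars.find line [']']
      let ch' := ch ++ pyRJust (PySem.List.slice line (some (x + 1)) (some y))
                              (if ch.isEmpty then x + 1 else x)
      let ly' := ly ++ PySem.List.slice line (some 0) (some x)
      chordLineA fuel (PySem.List.slice line (some (y + 1)) none) ch' ly'
    else (ch, ly ++ line)

def chord_parse (paragraph : List String) : List String :=
  paragraph.flatMap (fun line =>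
    let r := chordLineA (line.toList.length + 1) line.toList [] []
    [String.ofList r.1, String.ofList r.2])

-- ===== PORT B =====

def chordLineB (fuel : Nat) (line : List Char) (pos : Nat) (first : Bool)
    (chParts lyParts : List (List Char)) : List Char × List Char :=
  match fuel with
  | 0 => (chParts.flatten, lyParts.flatten ++ PySem.List.slice line (some (pos : Int)) none)
  | fuel + 1 =>
    let x := PySem.Chars.findFrom line ['['] (pos : Int)
    if x = -1 then
      (chParts.flatten, lyParts.flatten ++ PySem.List.slice line (some (pos : Int)) none)
    else
      let y := PySem.Chars.findFrom line [']'] (pos : Int)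
      if y = -1 then
        (chParts.flatten, lyParts.flatten ++ PySem.List.slice line (some (pos : Int)) none)
      else
        let chord := PySem.List.slice line (some (x + 1)) (some y)
        let width : Int := x - pos + (if first then 1 else 0)
        let pad : Int := width - chord.length
        let chParts' := (if 0 < pad then chParts ++ [List.replicate pad.toNat ' '] else chParts)
                          ++ [chord]
        let lyParts' := lyParts ++ [PySem.List.slice line (some (pos : Int)) (some x)]
        chordLineB fuel line (y.toNat + 1) false chParts' lyParts'

def chord_parse_alt (paragraph : List String) : List String :=
  paragraph.flatMap (fun line =>
    let r := chordLineB (line.toList.length + 1) line.toList 0 true [] []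
    [String.ofList r.1, String.ofList r.2])

-- ===== PRECONDITION & SPEC =====

-- Pre_ excludes lines with a '[' somewhere after the last ']' (including a '[' with no ']'
-- at all): on exactly those lines A's while-loop never terminates, so A returns precisely
-- on the admitted inputs.
def Pre_chord_parse (paragraph : List String) : Prop :=
  ∀ line ∈ paragraph, '[' ∉ (line.toList.reverse.takeWhile (fun c => c ≠ ']'))
instance (paragraph : List String) : Decidable (Pre_chord_parse paragraph) := by
  unfold Pre_chord_parse; infer_instance

def pvWitness_chord_parse : List String := ["[C]Hello [G7]world []", "no chords here"]

def Spec_chord_parse (paragraph : List String) (out : List String) : Prop := out = chord_parse_alt paragraph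
instance (paragraph : List String) (out : List String) : Decidable (Spec_chord_parse paragraph out) := by unfold Spec_chord_parse; infer_instance

-- ===== CLAIM (what is proved, stated in full; the proofs are below) =====
def Claim_equal_chord_parse : Prop := ∀ (paragraph : List String), Dom_chord_parse paragraph → Pre_chord_parse paragraph → Spec_chord_parse paragraph (chord_parse paragraph)

-- ===== LEMMAS AND PROOFS =====

-- "no '[' after the last ']'" — the per-line form of Pre_chord_parse, the loop invariant

def GoodLine (s : List Char) : Prop := '[' ∉ (s.reverse.takeWhile (fun c => c ≠ ']'))

theorem goodLine_step (a b : List Char) (h : GoodLine (a ++ ']' :: b)) : GoodLine b := by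
  unfold GoodLine at h ⊢
  rw [List.reverse_append, List.reverse_cons, List.append_assoc, List.takeWhile_append] at h
  by_cases hc : (b.reverse.takeWhile (fun c => decide (c ≠ ']'))).length = b.reverse.length
  · rw [if_pos hc] at h
    have heq : b.reverse.takeWhile (fun c => decide (c ≠ ']')) = b.reverse :=
      (List.takeWhile_sublist _).eq_of_length hc
    rw [heq]
    intro hmem
    exact h (List.mem_append_left _ hmem)
  · rw [if_neg hc] at h; exact h

theorem goodLine_mem (s : List Char) (h : GoodLine s) (hb : '[' ∈ s) : ']' ∈ s := by
  by_contra hn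
  apply h
  have : s.reverse.takeWhile (fun c => decide (c ≠ ']')) = s.reverse := by
    apply List.takeWhile_eq_self_iff.mpr
    intro c hc
    simp only [decide_eq_true_eq]
    intro hcc; exact hn (by simpa [hcc] using List.mem_reverse.mp hc)

  rw [this, List.mem_reverse]; exact hb

theorem parts_flatten (chP : List (List Char)) (c : List Char) (w : Int) :
    ((if 0 < w - (c.length : Int) then chP ++ [List.replicate (w - (c.length : Int)).toNat ' '] else chP) ++ [c]).flatten
      = chP.flatten ++ pyRJust c w := by
  unfold pyRJust
  by_cases h : 0 < w - (c.length : Int)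
  · rw [if_pos h]; simp
  · rw [if_neg h]
    have : (w - (c.length : Int)).toNat = 0 := by omega
    simp [this]

theorem pyRJust_ne_nil (c : List Char) (w : Int) (h : 1 ≤ w ∨ c ≠ []) : pyRJust c w ≠ [] := by
  unfold pyRJust
  intro he
  rcases List.append_eq_nil_iff.mp he with ⟨h1, h2⟩
  rcases h with hw | hc
  · have : (w - (c.length : Int)).toNat ≠ 0 := by
      subst h2; simp at hw ⊢; omega
    exact this (by simpa using congrArg List.length h1)
  · exact hc h2

theorem loop_eq (line : List Char) :
    ∀ fuel pos (chP lyP : List (List Char)) (first : Bool),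
      pos ≤ line.length →
      GoodLine (line.drop pos) →
      line.length - pos < fuel →
      (first = true ↔ chP.flatten = []) →
      chordLineA fuel (line.drop pos) chP.flatten lyP.flatten
        = chordLineB fuel line pos first chP lyP := by
  intro fuel
  induction fuel with
  | zero => intro pos _ _ _ _ _ hf _; omega
  | succ fuel ih =>
    intro pos chP lyP first hpos hgood hfuel hfirst
    rw [chordLineA, chordLineB]
    rw [PySem.Chars.findFrom_natCast line ['['] pos hpos,
        PySem.Chars.findFrom_natCast line [']'] pos hpos]
    by_cases hin : PySem.Chars.isIn ['['] (line.drop pos) = true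
    · -- '[' present in the remaining line
      have hxmem : '[' ∈ line.drop pos :=
        (List.singleton_infix_iff _ _).mp ((PySem.Chars.isIn_iff_infix _ _).mp hin)
      have hymem : ']' ∈ line.drop pos := goodLine_mem _ hgood hxmem
      have hxnn : 0 ≤ PySem.Chars.find (line.drop pos) ['['] :=
        (PySem.Chars.find_nonneg_iff _ _).mpr ((List.singleton_infix_iff _ _).mpr hxmem)
      have hynn : 0 ≤ PySem.Chars.find (line.drop pos) [']'] :=
        (PySem.Chars.find_nonneg_iff _ _).mpr ((List.singleton_infix_iff _ _).mpr hymem)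
      obtain ⟨xn, hxn⟩ : ∃ n : Nat, PySem.Chars.find (line.drop pos) ['['] = (n : Int) :=
        ⟨_, (Int.toNat_of_nonneg hxnn).symm⟩
      obtain ⟨yn, hyn⟩ : ∃ n : Nat, PySem.Chars.find (line.drop pos) [']'] = (n : Int) :=
        ⟨_, (Int.toNat_of_nonneg hynn).symm⟩
      rw [if_pos hin, hxn, hyn]
      rw [if_neg (by omega : ¬((xn : Int) = -1)), if_neg (by omega : ¬((yn : Int) = -1))]
      rw [if_neg (by omega : ¬((pos : Int) + (xn : Int) = -1)),
          if_neg (by omega : ¬((pos : Int) + (yn : Int) = -1))]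
      simp only []
      -- facts about the first ']'
      have hypre : [']'] <+: (line.drop pos).drop yn := by
        have := (PySem.Chars.find_spec (s := line.drop pos) (sub := [']']) hynn).1
        rwa [hyn, Int.toNat_natCast] at this
      obtain ⟨t, ht⟩ := hypre
      have hdec : (line.drop pos).drop yn = ']' :: t := ht.symm
      have ht2 : line.drop (pos + yn + 1) = t := by
        have h2 : List.drop 1 ((line.drop pos).drop yn) = List.drop 1 (']' :: t) :=
          congrArg (List.drop 1) hdec
        simp only [List.drop_drop, List.drop_succ_cons, List.drop_zero] at h2
        exact h2
      have hylt : yn < (line.drop pos).length := by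
        by_contra hle
        rw [List.drop_eq_nil_of_le (by omega)] at hdec
        exact absurd hdec.symm (List.cons_ne_nil _ _)
      have hslen : (line.drop pos).length = line.length - pos := List.length_drop ..
      -- the four data components agree
      have hchord : PySem.List.slice (line.drop pos) (some ((xn : Int) + 1)) (some (yn : Int))
          = PySem.List.slice line (some ((pos : Int) + (xn : Int) + 1)) (some ((pos : Int) + (yn : Int))) := by
        rw [(by push_cast; ring : ((xn : Int) + 1) = ((xn + 1 : Nat) : Int)),
            (by push_cast; ring : ((pos : Int) + (xn : Int) + 1) = ((pos + xn + 1 : Nat) : Int)),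
            (by push_cast; ring : ((pos : Int) + (yn : Int)) = ((pos + yn : Nat) : Int)),
            PySem.List.slice_natCast, PySem.List.slice_natCast, List.drop_drop]
        rw [(by omega : pos + (xn + 1) = pos + xn + 1), (by omega : pos + yn - (pos + xn + 1) = yn - (xn + 1))]
      have hly : PySem.List.slice (line.drop pos) (some (0 : Int)) (some (xn : Int))
          = PySem.List.slice line (some (pos : Int)) (some ((pos : Int) + (xn : Int))) := by
        rw [(by norm_num : (0 : Int) = ((0 : Nat) : Int)),
            (by push_cast; ring : ((pos : Int) + (xn : Int)) = ((pos + xn : Nat) : Int)),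
            PySem.List.slice_natCast, PySem.List.slice_natCast, List.drop_drop]
        rw [(by omega : pos + 0 = pos), (by omega : pos + xn - pos = xn - 0)]
      have hwidth : ((pos : Int) + (xn : Int) - (pos : Int) + (if first = true then (1:Int) else 0))
          = (if chP.flatten.isEmpty = true then (xn : Int) + 1 else (xn : Int)) := by
        cases first with
        | true =>
          have : chP.flatten = [] := hfirst.mp rfl
          simp [this]
        | false =>
          have : ¬ chP.flatten = [] := fun h => by simpa using hfirst.mpr h
          simp [List.isEmpty_iff, this]
      -- rewrite B's state into A's shape
      rw [← hchord, ← hly, hwidth]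
      -- the recursive call: new suffix = drop (pos + yn + 1) line
      have htonat : ((pos : Int) + (yn : Int)).toNat + 1 = pos + yn + 1 := by omega
      have hnews : PySem.List.slice (line.drop pos) (some ((yn : Int) + 1)) none
          = line.drop (pos + yn + 1) := by
        rw [PySem.List.slice_from _ (by positivity : (0:Int) ≤ (yn : Int) + 1)]
        rw [(by omega : ((yn : Int) + 1).toNat = yn + 1), List.drop_drop]
        rw [(by omega : pos + (yn + 1) = pos + yn + 1)]
      rw [hnews, htonat]
      have hgood' : GoodLine (line.drop (pos + yn + 1)) := by
        have hsplit : line.drop pos = (line.drop pos).take yn ++ ']' :: t := by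
          conv_lhs => rw [← List.take_append_drop yn (line.drop pos)]
          rw [hdec]
        rw [ht2]
        exact goodLine_step _ _ (hsplit ▸ hgood)
      have hne : chP.flatten ++ pyRJust (PySem.List.slice (line.drop pos) (some ((xn:Int)+1)) (some (yn:Int)))
            (if chP.flatten.isEmpty = true then (xn:Int) + 1 else (xn:Int)) ≠ [] := by
        intro h
        rcases List.append_eq_nil_iff.mp h with ⟨h1, h2⟩
        have he : chP.flatten.isEmpty = true := by rw [h1]; rfl
        refine pyRJust_ne_nil _ _ ?_ h2
        left
        rw [if_pos he]
        omega
      have := ih (pos + yn + 1)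
        ((if 0 < (if chP.flatten.isEmpty = true then (xn:Int) + 1 else (xn:Int))
              - ((PySem.List.slice (line.drop pos) (some ((xn:Int)+1)) (some (yn:Int))).length : Int)
          then chP ++ [List.replicate ((if chP.flatten.isEmpty = true then (xn:Int) + 1 else (xn:Int))
              - ((PySem.List.slice (line.drop pos) (some ((xn:Int)+1)) (some (yn:Int))).length : Int)).toNat ' ']
          else chP) ++ [PySem.List.slice (line.drop pos) (some ((xn:Int)+1)) (some (yn:Int))])
        (lyP ++ [PySem.List.slice (line.drop pos) (some (0:Int)) (some (xn:Int))]) false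
        (by omega) hgood' (by omega)
        (by constructor
            · intro h; exact absurd h (by simp)
            · intro h
              rw [parts_flatten chP _ _] at h
              exact absurd h hne)
      rw [parts_flatten chP _ _,
          (by simp : (lyP ++ [PySem.List.slice (line.drop pos) (some (0:Int)) (some (xn:Int))]).flatten
            = lyP.flatten ++ PySem.List.slice (line.drop pos) (some (0:Int)) (some (xn:Int)))] at this
      exact this
    · -- no '[' : both sides exit
      have hfind : PySem.Chars.find (line.drop pos) ['['] = -1 := by
        rw [PySem.Chars.find_eq_neg_one_iff]
        intro hinf
        exact hin ((PySem.Chars.isIn_iff_infix _ _).mpr hinf)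
      rw [if_neg hin, hfind, if_pos rfl]
      rw [PySem.List.slice_from _ (Int.natCast_nonneg pos), Int.toNat_natCast]
      simp

-- ===== VERDICT (by name: the statement is the Claim_ definition above) =====
theorem chord_parse_spec : Claim_equal_chord_parse := by
  intro paragraph hdom hpre
  unfold Spec_chord_parse chord_parse chord_parse_alt
  induction paragraph with
  | nil => rfl
  | cons l rest ih =>
    have hgood : GoodLine l.toList := hpre l (by simp)
    have h := loop_eq l.toList (l.toList.length + 1) 0 [] [] true (by omega)
      (by simpa using hgood) (by omega) (by simp)
    simp only [List.drop_zero, List.flatten_nil] at h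
    rw [List.flatMap_cons, List.flatMap_cons, h,
        ih (by revert hdom; unfold Dom_chord_parse; simp)
          (fun x hx => hpre x (List.mem_cons_of_mem _ hx))]
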